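-- pv_equiv track=rewrite | github.com/Chuchichachtli/CmpE230Project2 | bucourses.py | getLessonCode
-- ===== SOURCE A (Python) =====
-- def getLessonCode(STR):
--     a = ""
--     flag = 0
--     under = 1
--     for letter in STR:
--         if letter == '.':
--             break
--         if letter >= '0' and letter <= '9' and flag == 0:
--             flag = 1
--
--         if (letter >= '5' and letter <= '9') and flag == 1:
--             flag = 1230
--             under = 0
--         elif letter <= '4':
--             flag = 9
--         a+=letter
--     return a , under
-- ===== SOURCE B (Python) =====
-- def getLessonCode(STR):
--     # phase 1: the prefix before the first '.'
--     dot = STR.find('.')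
--     a = STR if dot < 0 else STR[:dot]
--     # phase 2: classify by the first character with code <= ord('9')
--     under = 1
--     for c in a:
--         if c <= '9':
--             if c >= '5':
--                 under = 0
--             break
--     return a, under
-- ===== Notes on version B (the rewrite author's own statement) =====
-- stated objective: simpler
-- what changed: Replaces A's single pass with a three-state flag machine by two phases: a find of the first dot plus a slice to get the prefix, then a scan for the first character at or below the digit-nine code point, which alone decides the flag.
import Mathlib
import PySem

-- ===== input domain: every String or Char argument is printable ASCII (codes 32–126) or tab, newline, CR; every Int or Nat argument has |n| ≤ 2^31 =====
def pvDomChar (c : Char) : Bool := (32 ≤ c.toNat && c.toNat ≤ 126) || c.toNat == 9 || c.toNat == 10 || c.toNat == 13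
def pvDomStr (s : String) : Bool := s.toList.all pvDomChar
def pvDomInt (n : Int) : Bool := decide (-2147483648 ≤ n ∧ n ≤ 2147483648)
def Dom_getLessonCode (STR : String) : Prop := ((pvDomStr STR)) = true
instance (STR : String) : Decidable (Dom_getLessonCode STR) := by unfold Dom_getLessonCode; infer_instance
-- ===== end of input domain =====

-- B replaces A's single-pass three-state flag machine by two phases (find('.')+slice prefix,
-- then a scan for the first character with code ≤ '9'); objective: simpler.

-- ===== PORT A =====
-- A's loop: state (a, flag, under), break at '.'.
def pvGoA : List Char → List Char → Int → Int → List Char × Int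
  | [], a, _, under => (a, under)
  | letter :: rest, a, flag, under =>
    if letter = '.' then (a, under)
    else
      let flag1 := if '0' ≤ letter ∧ letter ≤ '9' ∧ flag = 0 then 1 else flag
      if '5' ≤ letter ∧ letter ≤ '9' ∧ flag1 = 1 then
        pvGoA rest (a ++ [letter]) 1230 0
      else if letter ≤ '4' then
        pvGoA rest (a ++ [letter]) 9 under
      else
        pvGoA rest (a ++ [letter]) flag1 under

def getLessonCode (STR : String) : String × Int :=
  let r := pvGoA STR.toList [] 0 1
  (String.ofList r.1, r.2)

-- ===== PORT B =====
-- B's second phase: first character with code ≤ '9' decides `under`; break.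
def pvUnderB : List Char → Int
  | [] => 1
  | c :: rest => if c ≤ '9' then (if '5' ≤ c then 0 else 1) else pvUnderB rest

def getLessonCode_alt (STR : String) : String × Int :=
  let dot := PySem.Str.find STR "."
  let a := if dot < 0 then STR else String.ofList (PySem.List.slice STR.toList none (some dot))
  (a, pvUnderB a.toList)

-- ===== PRECONDITION & SPEC =====
def Spec_getLessonCode (STR : String) (out : String × Int) : Prop := out = getLessonCode_alt STR
instance (STR : String) (out : String × Int) : Decidable (Spec_getLessonCode STR out) := by unfold Spec_getLessonCode; infer_instance

-- ===== CLAIM (what is proved, stated in full; the proofs are below) =====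
def Claim_equal_getLessonCode : Prop := ∀ (STR : String), Dom_getLessonCode STR → Spec_getLessonCode STR (getLessonCode STR)

-- ===== LEMMAS AND PROOFS =====

-- [c] is a prefix of xs iff xs starts with c
theorem pv_head_of_singleton_prefix {c : Char} {xs : List Char} (h : [c] <+: xs) :
    xs.head? = some c := by rcases h with ⟨t, rfl⟩; rfl

-- char-order arithmetic on the '4'/'5' boundary
theorem pv_five_le_of_four_lt {c : Char} (h : '4' < c) : '5' ≤ c := by
  have h1 : '4'.val < c.val := Char.lt_def.mp h
  have h2 : ('4'.val).toNat < (c.val).toNat := UInt32.lt_iff_toNat_lt.mp h1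
  have h3 : ('4'.val).toNat = 52 := by decide
  refine Char.le_def.mpr (UInt32.le_iff_toNat_le.mpr ?_)
  have h5 : ('5'.val).toNat = 53 := by decide
  omega

-- take up to the first '.' is takeWhile (· ≠ '.')
theorem pv_take_eq_takeWhile (l : List Char) (k : Nat)
    (h1 : ∀ i, i < k → l[i]? ≠ some '.') (h2 : l[k]? = some '.') :
    l.take k = l.takeWhile (· ≠ '.') := by
  induction l generalizing k with
  | nil => simp at h2
  | cons c rest ih =>
    cases k with
    | zero =>
      simp at h2
      subst h2
      simp [List.takeWhile]
    | succ k =>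
      have hc : c ≠ '.' := by simpa using h1 0 (Nat.succ_pos k)
      have ihk : rest.take k = rest.takeWhile (· ≠ '.') :=
        ih k (fun i hi => by simpa using h1 (i + 1) (Nat.succ_lt_succ hi)) (by simpa using h2)
      simp [List.take_succ_cons, hc, ihk]

-- B's prefix (find + slice) is the takeWhile prefix
theorem pv_prefix_eq (s : String) :
    (if PySem.Str.find s "." < 0 then s.toList
     else PySem.List.slice s.toList none (some (PySem.Str.find s "."))) =
      s.toList.takeWhile (· ≠ '.') := by
  have hdotl : ("." : String).toList = ['.'] := rfl
  by_cases h : ['.'] <:+: s.toList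
  · have hnn : 0 ≤ PySem.Str.find s "." := by
      rw [PySem.Str.find_nonneg_iff, hdotl]; exact h
    have hlt : ¬ PySem.Str.find s "." < 0 := not_lt.mpr hnn
    have hfind : PySem.Str.find s "." = PySem.Chars.find s.toList ['.'] := by
      simp [PySem.Str.find_eq]
    rw [hfind] at hnn
    obtain ⟨hpref, hmin⟩ := PySem.Chars.find_spec hnn
    rw [if_neg hlt, PySem.List.slice_to s.toList (hfind ▸ hnn), hfind]
    refine pv_take_eq_takeWhile s.toList (PySem.Chars.find s.toList ['.']).toNat ?_ ?_
    · intro i hi hdot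
      refine hmin i hi ?_
      have hh : (s.toList.drop i).head? = some '.' := by
        rw [List.head?_drop]; simpa using hdot
      rcases hdrop : s.toList.drop i with _ | ⟨x, xs⟩
      · rw [hdrop] at hh; simp at hh
      · rw [hdrop] at hh
        simp at hh
        subst hh
        exact ⟨xs, rfl⟩
    · have hh := pv_head_of_singleton_prefix hpref
      rw [List.head?_drop] at hh
      simpa using hh
  · have hfneg : PySem.Str.find s "." = -1 := by
      rw [PySem.Str.find_eq_neg_one_iff, hdotl]; exact h
    rw [hfneg, if_pos (by norm_num)]
    refine (List.takeWhile_eq_self_iff.mpr ?_).symm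
    intro a ha
    simp only [decide_eq_true_eq]
    rintro rfl
    obtain ⟨p, t, hst⟩ := List.append_of_mem ha
    exact h ⟨p, t, by rw [hst]; simp⟩

-- once flag is a dead value (9 or 1230), under never changes
theorem pv_goA_dead (l : List Char) (a : List Char) (f u : Int)
    (h0 : f ≠ 0) (h1 : f ≠ 1) :
    pvGoA l a f u = (a ++ l.takeWhile (· ≠ '.'), u) := by
  induction l generalizing a f with
  | nil => simp [pvGoA]
  | cons c rest ih =>
    by_cases hdot : c = '.'
    · simp [pvGoA, hdot]
    · have hd9 := ih (a ++ [c]) 9 (by norm_num) (by norm_num)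
      have hdf := ih (a ++ [c]) f h0 h1
      by_cases h4 : c ≤ '4'
      · simp [pvGoA, hdot, h0, h1, h4, hd9]
      · simp [pvGoA, hdot, h0, h1, h4, hdf]

-- A's loop from the initial state computes B's two phases
theorem pv_goA_main (l : List Char) (a : List Char) :
    pvGoA l a 0 1 = (a ++ l.takeWhile (· ≠ '.'), pvUnderB (l.takeWhile (· ≠ '.'))) := by
  induction l generalizing a with
  | nil => simp [pvGoA, pvUnderB]
  | cons c rest ih =>
    by_cases hdot : c = '.'
    · simp [pvGoA, hdot, pvUnderB]
    · have hd9 := pv_goA_dead rest (a ++ [c]) 9 1 (by norm_num) (by norm_num)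
      have hd12 := pv_goA_dead rest (a ++ [c]) 1230 0 (by norm_num) (by norm_num)
      by_cases h4 : c ≤ '4'
      · -- first significant char, below '5': under stays 1
        have h5 : ¬ '5' ≤ c := by
          intro h5
          exact absurd (le_trans h5 h4) (by decide)
        have h9 : c ≤ '9' := le_trans h4 (by decide)
        by_cases h0 : '0' ≤ c
        · simp [pvGoA, hdot, h0, h4, h5, h9, hd9, pvUnderB]
        · simp [pvGoA, hdot, h0, h4, h5, h9, hd9, pvUnderB]
      · have h5 : '5' ≤ c := pv_five_le_of_four_lt (not_le.mp h4)
        have h0 : '0' ≤ c := le_trans (by decide) h5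
        by_cases h9 : c ≤ '9'
        · -- first significant char, in '5'..'9': under becomes 0
          simp [pvGoA, hdot, h0, h5, h9, hd12, pvUnderB]
        · -- above '9': not significant, state unchanged
          simp [pvGoA, hdot, h0, h4, h5, h9, ih, pvUnderB]

-- ===== VERDICT (by name: the statement is the Claim_ definition above) =====
theorem getLessonCode_spec : Claim_equal_getLessonCode := by
  intro STR _
  unfold Spec_getLessonCode getLessonCode getLessonCode_alt
  rw [pv_goA_main STR.toList []]
  have hpre := pv_prefix_eq STR
  by_cases hlt : PySem.Str.find STR "." < 0
  · rw [if_pos hlt] at hpre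
    simp only [if_pos hlt, List.nil_append]
    rw [← hpre]
    exact Prod.ext (String.ofList_toList) rfl
  · rw [if_neg hlt] at hpre
    simp only [if_neg hlt, List.nil_append]
    rw [← hpre]
    exact Prod.ext rfl (by rw [String.toList_ofList])
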